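-- pv_equiv track=rewrite | github.com/mr-ahtashamulhaq/python_repo | python_practice/Python Strings/Task_26_Equal point in a string of brackets_Medium.py | findEqualPoint
-- ===== SOURCE A (Python) =====
-- def findEqualPoint(s):
--     n = len(s)
--
--     close_count = s.count(')')
--     open_count = 0
--
--     for i in range(n):
--         if s[i] == '(':
--             open_count += 1
--         else:
--             close_count -= 1
--
--         if open_count == close_count:
--             return i + 1
--
--     return -1
-- ===== SOURCE B (Python) =====
-- def findEqualPoint(s):
--     c = s.count(')')
--     return c if c else -1
-- ===== Notes on version B (the rewrite author's own statement) =====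
-- stated objective: faster
-- what changed: Replaces the running open/close counter scan with a closed form: the loop's equality fires exactly when i+1 equals the total number of close brackets, so B returns that count if nonzero, else -1.
import Mathlib
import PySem

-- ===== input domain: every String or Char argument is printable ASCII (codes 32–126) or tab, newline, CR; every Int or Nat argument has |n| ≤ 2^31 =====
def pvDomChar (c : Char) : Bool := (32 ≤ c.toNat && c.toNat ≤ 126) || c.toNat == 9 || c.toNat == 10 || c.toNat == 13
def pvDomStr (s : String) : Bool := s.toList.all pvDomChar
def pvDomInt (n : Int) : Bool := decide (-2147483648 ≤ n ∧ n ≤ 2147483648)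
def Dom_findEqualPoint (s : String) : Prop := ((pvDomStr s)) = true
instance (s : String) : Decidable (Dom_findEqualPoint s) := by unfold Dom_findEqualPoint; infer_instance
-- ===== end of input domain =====

-- B replaces A's running-counter scan by the closed form s.count(')') (or -1 when that is 0);
-- proved exactly equal for all strings.

-- ===== PORT A =====
-- the 'for i in range(n)' loop with early return, carrying (i, open_count, close_count)
def findEqualPointGo : List Char → Int → Int → Int → Int
  | [], _, _, _ => -1
  | c :: rest, i, openC, closeC =>
    let openC' := if c = '(' then openC + 1 else openC
    let closeC' := if c = '(' then closeC else closeC - 1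
    if openC' = closeC' then i + 1 else findEqualPointGo rest (i + 1) openC' closeC'

def findEqualPoint (s : String) : Int :=
  findEqualPointGo s.toList 0 0 (PySem.Str.count s ")")

-- ===== PORT B =====
def findEqualPoint_alt (s : String) : Int :=
  let c : Int := (PySem.Str.count s ")" : Int)
  if c ≠ 0 then c else -1

-- ===== PRECONDITION & SPEC =====
def Spec_findEqualPoint (s : String) (out : Int) : Prop := out = findEqualPoint_alt s
instance (s : String) (out : Int) : Decidable (Spec_findEqualPoint s out) := by unfold Spec_findEqualPoint; infer_instance

-- ===== CLAIM (what is proved, stated in full; the proofs are below) =====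
def Claim_equal_findEqualPoint : Prop := ∀ (s : String), Dom_findEqualPoint s → Spec_findEqualPoint s (findEqualPoint s)

-- ===== LEMMAS AND PROOFS =====

-- s.count(sub) with a one-char sub is the character count
theorem chars_count_go_single (x : Char) (l : List Char) : ∀ (fuel acc : Nat), l.length ≤ fuel →
    PySem.Chars.count.go [x] fuel l acc = acc + l.count x := by
  induction l with
  | nil => intro fuel acc _; cases fuel <;> simp [PySem.Chars.count.go]
  | cons c rest ih =>
    intro fuel acc h
    cases fuel with
    | zero => simp at h
    | succ f =>
      simp only [PySem.Chars.count.go, List.isPrefixOf]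
      by_cases hc : x = c
      · subst hc
        rw [if_pos (by simp)]
        simp only [List.length_singleton, List.drop_one, List.tail_cons]
        rw [ih f (acc + 1) (by simpa using h)]
        simp; omega
      · rw [if_neg (by simp [hc])]
        rw [ih f acc (by simpa using h)]
        simp [Ne.symm hc]

theorem chars_count_single (x : Char) (cs : List Char) :
    PySem.Chars.count cs [x] = cs.count x := by
  simp [PySem.Chars.count, chars_count_go_single x cs cs.length 0 le_rfl]

-- loop invariant: closeC - openC + i is conserved; the loop returns i + (closeC - openC)
-- exactly when that offset is reachable within the remaining characters
theorem findEqualPointGo_eq (rest : List Char) : ∀ (i openC closeC : Int),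
    findEqualPointGo rest i openC closeC =
      if 0 < closeC - openC ∧ closeC - openC ≤ rest.length then i + (closeC - openC) else -1 := by
  induction rest with
  | nil =>
    intro i openC closeC
    simp only [findEqualPointGo, List.length_nil]
    rw [if_neg (by omega)]
  | cons c rest ih =>
    intro i openC closeC
    simp only [findEqualPointGo, List.length_cons]
    by_cases hc : c = '('
    · simp only [if_pos hc]
      by_cases he : openC + 1 = closeC
      · rw [if_pos he, if_pos (by push_cast; omega)]; omega
      · rw [if_neg he, ih]
        by_cases hr : 0 < closeC - (openC + 1) ∧ closeC - (openC + 1) ≤ rest.length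
        · rw [if_pos hr, if_pos (by push_cast at hr ⊢; omega)]; omega
        · rw [if_neg hr, if_neg (by push_cast at hr ⊢; omega)]
    · simp only [if_neg hc]
      by_cases he : openC = closeC - 1
      · rw [if_pos he, if_pos (by push_cast; omega)]; omega
      · rw [if_neg he, ih]
        by_cases hr : 0 < closeC - 1 - openC ∧ closeC - 1 - openC ≤ rest.length
        · rw [if_pos hr, if_pos (by push_cast at hr ⊢; omega)]; omega
        · rw [if_neg hr, if_neg (by push_cast at hr ⊢; omega)]

-- ===== VERDICT (by name: the statement is the Claim_ definition above) =====
theorem findEqualPoint_spec : Claim_equal_findEqualPoint := by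
  unfold Claim_equal_findEqualPoint
  intro s _
  unfold Spec_findEqualPoint findEqualPoint findEqualPoint_alt
  have hcnt : PySem.Str.count s ")" = s.toList.count ')' := by
    simp [PySem.Str.count_eq]
    exact chars_count_single ')' s.toList
  have hle : s.toList.count ')' ≤ s.toList.length := List.count_le_length
  rw [findEqualPointGo_eq, hcnt]
  by_cases h0 : s.toList.count ')' = 0
  · rw [if_neg (by omega), if_neg (by omega)]
  · rw [if_pos (by omega), if_pos (by omega)]
    omega
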